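-- pv_equiv track=rewrite | github.com/TuringDynamics3000/turing-resolve-ui | twin-orchestrator/src/credit_card_shadow/cc_reconciler.py | calculate_arrears_buckets
-- ===== SOURCE A (Python) =====
-- from typing import Dict, List, Any
--
-- def calculate_arrears_buckets(
--     ccs: List[Dict[str, Any]]
-- ) -> Dict[str, int]:
--     """
--     Calculate arrears buckets for credit cards.
--
--     Args:
--         ccs: List of credit cards with days_past_due
--
--     Returns:
--         Dict with arrears bucket counts
--     """
--     buckets = {
--         "0_30_days": 0,
--         "31_60_days": 0,
--         "61_90_days": 0,
--         "90_plus_days": 0,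
--     }
--
--     for cc in ccs:
--         days_past_due = cc.get("days_past_due", 0)
--
--         if days_past_due == 0:
--             continue
--         elif days_past_due <= 30:
--             buckets["0_30_days"] += 1
--         elif days_past_due <= 60:
--             buckets["31_60_days"] += 1
--         elif days_past_due <= 90:
--             buckets["61_90_days"] += 1
--         else:
--             buckets["90_plus_days"] += 1
--
--     return buckets
-- ===== SOURCE B (Python) =====
-- def calculate_arrears_buckets(ccs):
--     """Staged cumulative tally: extract the nonzero days once, take overlapping
--     cumulative counts at the thresholds, and derive each bucket as a difference
--     of cumulative counts (no per-element branch cascade)."""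
--     overdue = [cc.get("days_past_due", 0) for cc in ccs]
--     overdue = [d for d in overdue if d != 0]
--     le30 = sum(1 for d in overdue if d <= 30)
--     le60 = sum(1 for d in overdue if d <= 60)
--     le90 = sum(1 for d in overdue if d <= 90)
--     return {
--         "0_30_days": le30,
--         "31_60_days": le60 - le30,
--         "61_90_days": le90 - le60,
--         "90_plus_days": len(overdue) - le90,
--     }
-- ===== Notes on version B (the rewrite author's own statement) =====
-- stated objective: alternative
-- what changed: Replaced the single-pass if-elif classification into a mutable dict by staged passes: extract the nonzero days_past_due values, take overlapping cumulative counts at thresholds 30/60/90, and compute each bucket as a difference of cumulative counts.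
import Mathlib
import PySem

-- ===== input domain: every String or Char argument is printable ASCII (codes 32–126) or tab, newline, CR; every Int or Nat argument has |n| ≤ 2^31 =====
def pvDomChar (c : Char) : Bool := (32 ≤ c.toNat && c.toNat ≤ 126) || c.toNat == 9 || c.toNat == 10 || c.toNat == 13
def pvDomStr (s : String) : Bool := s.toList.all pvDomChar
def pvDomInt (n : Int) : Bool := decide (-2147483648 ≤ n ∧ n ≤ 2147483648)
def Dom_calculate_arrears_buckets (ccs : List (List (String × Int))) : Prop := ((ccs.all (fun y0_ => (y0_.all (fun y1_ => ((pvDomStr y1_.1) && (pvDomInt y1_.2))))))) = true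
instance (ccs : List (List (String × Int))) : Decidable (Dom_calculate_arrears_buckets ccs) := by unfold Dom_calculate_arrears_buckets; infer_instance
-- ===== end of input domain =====

-- B replaces A's single-pass if-elif cascade into a dict by staged passes: extract
-- nonzero days, take cumulative counts at 30/60/90, buckets = differences (alternative, same cost).


-- ===== PORT A =====
-- one loop step of A's for-loop (the if-elif cascade writing into the dict)
def pvStepA (b : PySem.Dict String Int) (cc : List (String × Int)) : PySem.Dict String Int :=
  let days_past_due := ((cc.lookup "days_past_due").getD 0 : Int)
  if days_past_due == 0 then b
  else if days_past_due ≤ 30 then b.insert "0_30_days" (b.getD "0_30_days" 0 + 1)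
  else if days_past_due ≤ 60 then b.insert "31_60_days" (b.getD "31_60_days" 0 + 1)
  else if days_past_due ≤ 90 then b.insert "61_90_days" (b.getD "61_90_days" 0 + 1)
  else b.insert "90_plus_days" (b.getD "90_plus_days" 0 + 1)

def calculate_arrears_buckets (ccs : List (List (String × Int))) : List (String × Int) :=
  let buckets : PySem.Dict String Int :=
    PySem.Dict.ofList [("0_30_days", 0), ("31_60_days", 0), ("61_90_days", 0), ("90_plus_days", 0)]
  (ccs.foldl pvStepA buckets).items

-- ===== PORT B =====
def calculate_arrears_buckets_alt (ccs : List (List (String × Int))) : List (String × Int) :=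
  let overdue := (ccs.map (fun cc => ((cc.lookup "days_past_due").getD 0 : Int))).filter (fun d => d ≠ 0)
  let le30 : Int := (overdue.countP (fun d => d ≤ 30) : Int)
  let le60 : Int := (overdue.countP (fun d => d ≤ 60) : Int)
  let le90 : Int := (overdue.countP (fun d => d ≤ 90) : Int)
  [("0_30_days", le30), ("31_60_days", le60 - le30),
   ("61_90_days", le90 - le60), ("90_plus_days", (overdue.length : Int) - le90)]

-- ===== PRECONDITION & SPEC =====
def Spec_calculate_arrears_buckets (ccs : List (List (String × Int))) (out : List (String × Int)) : Prop := out = calculate_arrears_buckets_alt ccs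
instance (ccs : List (List (String × Int))) (out : List (String × Int)) : Decidable (Spec_calculate_arrears_buckets ccs out) := by unfold Spec_calculate_arrears_buckets; infer_instance

-- ===== CLAIM (what is proved, stated in full; the proofs are below) =====
def Claim_equal_calculate_arrears_buckets : Prop := ∀ (ccs : List (List (String × Int))), Dom_calculate_arrears_buckets ccs → Spec_calculate_arrears_buckets ccs (calculate_arrears_buckets ccs)

-- ===== LEMMAS AND PROOFS =====

-- the nonzero days extracted from a list of cards (B's `overdue`)
def pvOverdue (ccs : List (List (String × Int))) : List Int :=
  (ccs.map (fun cc => ((cc.lookup "days_past_due").getD 0 : Int))).filter (fun d => d ≠ 0)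

-- the shape of A's dict state, parameterised by the four counts
def pvMkD (a b c d : Int) : PySem.Dict String Int :=
  PySem.Dict.ofList [("0_30_days", a), ("31_60_days", b), ("61_90_days", c), ("90_plus_days", d)]

theorem pvStepA_mk (cc : List (String × Int)) (a b c d : Int) :
    pvStepA (pvMkD a b c d) cc =
      let dd := ((cc.lookup "days_past_due").getD 0 : Int)
      if dd == 0 then pvMkD a b c d
      else if dd ≤ 30 then pvMkD (a + 1) b c d
      else if dd ≤ 60 then pvMkD a (b + 1) c d
      else if dd ≤ 90 then pvMkD a b (c + 1) d
      else pvMkD a b c (d + 1) := by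
  simp only [pvStepA, pvMkD]
  split_ifs <;> rfl

-- main invariant: the fold's items are the start counts plus cumulative-count differences
theorem pv_fold_eq (ccs : List (List (String × Int))) : ∀ (a b c d : Int),
    (ccs.foldl pvStepA (pvMkD a b c d)).items =
      [("0_30_days", a + ((pvOverdue ccs).countP (fun d => d ≤ 30) : Int)),
       ("31_60_days", b + (((pvOverdue ccs).countP (fun d => d ≤ 60) : Int) - ((pvOverdue ccs).countP (fun d => d ≤ 30) : Int))),
       ("61_90_days", c + (((pvOverdue ccs).countP (fun d => d ≤ 90) : Int) - ((pvOverdue ccs).countP (fun d => d ≤ 60) : Int))),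
       ("90_plus_days", d + (((pvOverdue ccs).length : Int) - ((pvOverdue ccs).countP (fun d => d ≤ 90) : Int)))] := by
  induction ccs with
  | nil => intro a b c d; simp [pvOverdue]; rfl
  | cons cc rest ih =>
    intro a b c d
    simp only [List.foldl_cons, pvStepA_mk]
    have hov : pvOverdue (cc :: rest) =
        (if ((cc.lookup "days_past_due").getD 0 : Int) ≠ 0
          then ((cc.lookup "days_past_due").getD 0 : Int) :: pvOverdue rest
          else pvOverdue rest) := by
      simp only [pvOverdue, List.map_cons, List.filter_cons]
      by_cases h : ((cc.lookup "days_past_due").getD 0 : Int) = 0 <;> simp [h]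
    set dd := ((cc.lookup "days_past_due").getD 0 : Int) with hdd
    by_cases h0 : dd = 0
    · have e0 : (dd == 0) = true := by simp [h0]
      simp only [e0, if_true]
      rw [ih a b c d, hov]
      simp [h0]
    · by_cases h1 : dd ≤ 30
      · have e0 : (dd == 0) = false := by simp [h0]
        rw [e0]
        simp only [Bool.false_eq_true, if_false, if_pos h1]
        rw [ih (a + 1) b c d, hov, if_pos h0]
        simp only [List.countP_cons, List.length_cons]
        have q1 : (fun d => decide (d ≤ 30)) dd = true := by simp [h1]
        have q2 : (fun d => decide (d ≤ 60)) dd = true := by simp; omega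
        have q3 : (fun d => decide (d ≤ 90)) dd = true := by simp; omega
        simp only [q1, q2, q3, if_true, List.cons.injEq, Prod.mk.injEq, and_true, true_and]
        push_cast
        omega
      · by_cases h2 : dd ≤ 60
        · have e0 : (dd == 0) = false := by simp [h0]
          rw [e0]
          simp only [Bool.false_eq_true, if_false, if_neg h1, if_pos h2]
          rw [ih a (b + 1) c d, hov, if_pos h0]
          simp only [List.countP_cons, List.length_cons]
          have q1 : (fun d => decide (d ≤ 30)) dd = false := by simp; omega
          have q2 : (fun d => decide (d ≤ 60)) dd = true := by simp [h2]
          have q3 : (fun d => decide (d ≤ 90)) dd = true := by simp; omega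
          simp only [q1, q2, q3, if_true, List.cons.injEq, Prod.mk.injEq, and_true, true_and]
          push_cast
          omega
        · by_cases h3 : dd ≤ 90
          · have e0 : (dd == 0) = false := by simp [h0]
            rw [e0]
            simp only [Bool.false_eq_true, if_false, if_neg h1, if_neg h2, if_pos h3]
            rw [ih a b (c + 1) d, hov, if_pos h0]
            simp only [List.countP_cons, List.length_cons]
            have q1 : (fun d => decide (d ≤ 30)) dd = false := by simp; omega
            have q2 : (fun d => decide (d ≤ 60)) dd = false := by simp; omega
            have q3 : (fun d => decide (d ≤ 90)) dd = true := by simp [h3]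
            simp only [q1, q2, q3, if_true, List.cons.injEq, Prod.mk.injEq, and_true, true_and]
            push_cast
            omega
          · have e0 : (dd == 0) = false := by simp [h0]
            rw [e0]
            simp only [Bool.false_eq_true, if_false, if_neg h1, if_neg h2, if_neg h3]
            rw [ih a b c (d + 1), hov, if_pos h0]
            simp only [List.countP_cons, List.length_cons]
            have q1 : (fun d => decide (d ≤ 30)) dd = false := by simp; omega
            have q2 : (fun d => decide (d ≤ 60)) dd = false := by simp; omega
            have q3 : (fun d => decide (d ≤ 90)) dd = false := by simp; omega
            simp only [q1, q2, q3, List.cons.injEq, Prod.mk.injEq, and_true, true_and]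
            push_cast
            omega

-- ===== VERDICT (by name: the statement is the Claim_ definition above) =====
theorem calculate_arrears_buckets_spec : Claim_equal_calculate_arrears_buckets := by
  intro ccs _
  unfold Spec_calculate_arrears_buckets
  simpa [calculate_arrears_buckets, calculate_arrears_buckets_alt, pvOverdue, pvMkD] using
    pv_fold_eq ccs 0 0 0 0
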